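-- pv_equiv track=rewrite | github.com/zzhx1/vllm-ascend | vllm_ascend/worker/pcp_utils.py | _split_multi_batch_kv_idx
-- ===== SOURCE A (Python) =====
-- def _split_multi_batch_kv_idx(
--
--     kv_nomask_idx_multi_batch,
--     split_size,
-- ):
--     batch_lengths = [len(batch) for batch in kv_nomask_idx_multi_batch]
--     max_batch_length = max(batch_lengths) if batch_lengths else 0
--     time = (max_batch_length + split_size - 1) // split_size
--     split_kv_idx_3d = []
--     split_kv_len_2d = []
--     merged_split_kv_idx_3d = []
--
--     for single_batch in kv_nomask_idx_multi_batch: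
--         current_batch_split = []
--         current_batch_len = []
--         for t in range(time):
--             start = t * split_size
--             current_segment = single_batch[start : start + split_size]
--             current_batch_split.append(current_segment)
--             current_batch_len.append(len(current_segment))
--
--         split_kv_idx_3d.append(current_batch_split)
--         split_kv_len_2d.append(current_batch_len)
--
--     for time_idx in range(time):
--         current_time_merged = []
--         for batch in split_kv_idx_3d:
--             current_time_merged.extend(batch[time_idx])
--         merged_split_kv_idx_3d.append(current_time_merged)
--
--     def reshape_kv_len_to_time_first(split_kv_len_2d):
--         if not split_kv_len_2d or not split_kv_len_2d[0]:
--             return []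
--         return [
--             [batch_len[time_idx] for batch_len in split_kv_len_2d] for time_idx in range(len(split_kv_len_2d[0]))
--         ]
--
--     merged_split_kv_len_2d = reshape_kv_len_to_time_first(split_kv_len_2d)
--     return merged_split_kv_idx_3d, merged_split_kv_len_2d
-- ===== SOURCE B (Python) =====
-- def _split_multi_batch_kv_idx(
--     kv_nomask_idx_multi_batch,
--     split_size,
-- ):
--     max_len = max((len(b) for b in kv_nomask_idx_multi_batch), default=0)
--     time = -(-max_len // split_size)  # ceil division; <= 0 (hence no segments) for non-positive needs
--     merged_idx = []
--     merged_len = []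
--     for t in range(time):
--         start = t * split_size
--         row = []
--         lens = []
--         for batch in kv_nomask_idx_multi_batch:
--             seg = batch[start:start + split_size]
--             row.extend(seg)
--             lens.append(len(seg))
--         merged_idx.append(row)
--         merged_len.append(lens)
--     return merged_idx, merged_len
-- ===== Notes on version B (the rewrite author's own statement) =====
-- stated objective: simpler
-- what changed: B replaces A's batch-outer pass that builds a 3D table plus a separate merge loop and a transpose/reshape helper by one fused time-outer pass that emits each merged index row and its length row directly (ceil division written as -(-m//s)).
-- intended difference: For negative split_size with every batch of length <= 1 (including no batches), A's ceil formula (m+s-1)//s yields a positive 'time' and A returns phantom all-empty segment rows such as ([[]], [[0]]), while B's ceil division yields time 0 and B returns ([], []), the intended 'no segments' result for a non-positive split size. — e.g. on _split_multi_batch_kv_idx([[5]], -1): A returns ([[]], [[0]]), B returns ([], [])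
import Mathlib
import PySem

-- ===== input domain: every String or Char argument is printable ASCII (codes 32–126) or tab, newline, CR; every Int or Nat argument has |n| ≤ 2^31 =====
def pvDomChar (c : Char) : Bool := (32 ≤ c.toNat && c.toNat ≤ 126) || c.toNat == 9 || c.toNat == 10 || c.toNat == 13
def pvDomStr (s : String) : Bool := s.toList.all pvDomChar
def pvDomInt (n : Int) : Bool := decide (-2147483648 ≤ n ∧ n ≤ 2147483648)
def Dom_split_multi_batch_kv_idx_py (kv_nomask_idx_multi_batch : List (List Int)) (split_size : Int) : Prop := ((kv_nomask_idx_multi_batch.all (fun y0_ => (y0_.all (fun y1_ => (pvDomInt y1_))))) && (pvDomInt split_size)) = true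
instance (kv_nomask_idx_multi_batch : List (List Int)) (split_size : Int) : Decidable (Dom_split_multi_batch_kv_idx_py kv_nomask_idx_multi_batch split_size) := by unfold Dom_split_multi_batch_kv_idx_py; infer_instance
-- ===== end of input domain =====

-- B replaces A's batch-outer 3D table + merge loop + transpose/reshape by one fused
-- time-outer pass emitting each merged row and its length row directly (objective: simpler).

-- ===== PORT A =====
-- helper: A's nested `reshape_kv_len_to_time_first`
def pvReshapeKvLenToTimeFirst (split_kv_len_2d : List (List Int)) : List (List Int) :=
  match split_kv_len_2d with
  | [] => []
  | r0 :: _ =>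
    if r0 = [] then []
    else (PySem.List.pyRange 0 (r0.length : Int)).map
      (fun time_idx => split_kv_len_2d.map
        (fun batch_len => (PySem.List.pyGet? batch_len time_idx).getD 0))
        -- batch_len[time_idx]: always in range here (every row has length time), so getD is never taken

def split_multi_batch_kv_idx_py (kv_nomask_idx_multi_batch : List (List Int)) (split_size : Int) : List (List Int) × List (List Int) :=
  let batch_lengths : List Int := kv_nomask_idx_multi_batch.map (fun batch => (batch.length : Int))
  let max_batch_length : Int :=
    if batch_lengths ≠ [] then (PySem.List.max? batch_lengths (fun y => y)).getD 0 else 0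
    -- `max(batch_lengths)` only evaluated when nonempty, where max? = some _, so getD is never taken
  let time : Int := PySem.Int.floordiv (max_batch_length + split_size - 1) split_size
  let st : List (List (List Int)) × List (List Int) :=
    kv_nomask_idx_multi_batch.foldl
      (fun st single_batch =>
        let cur : List (List Int) × List Int :=
          (PySem.List.pyRange 0 time).foldl
            (fun cs t =>
              let start := t * split_size
              let current_segment := PySem.List.slice single_batch (some start) (some (start + split_size))
              (cs.1 ++ [current_segment], cs.2 ++ [(current_segment.length : Int)]))
            ([], [])
        (st.1 ++ [cur.1], st.2 ++ [cur.2]))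
      ([], [])
  let merged_split_kv_idx_3d : List (List Int) :=
    (PySem.List.pyRange 0 time).foldl
      (fun acc time_idx =>
        acc ++ [st.1.foldl (fun cur batch => cur ++ (PySem.List.pyGet? batch time_idx).getD []) []])
        -- batch[time_idx]: always in range (each batch list has length time), so getD is never taken
      []
  (merged_split_kv_idx_3d, pvReshapeKvLenToTimeFirst st.2)

-- ===== PORT B =====
def split_multi_batch_kv_idx_py_alt (kv_nomask_idx_multi_batch : List (List Int)) (split_size : Int) : List (List Int) × List (List Int) :=
  let max_len : Int :=
    (PySem.List.max? (kv_nomask_idx_multi_batch.map (fun b => (b.length : Int))) (fun y => y)).getD 0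
  let time : Int := -(PySem.Int.floordiv (-max_len) split_size)
  (PySem.List.pyRange 0 time).foldl
    (fun out t =>
      let start := t * split_size
      let inner : List Int × List Int :=
        kv_nomask_idx_multi_batch.foldl
          (fun rl batch =>
            let seg := PySem.List.slice batch (some start) (some (start + split_size))
            (rl.1 ++ seg, rl.2 ++ [(seg.length : Int)]))
          ([], [])
      (out.1 ++ [inner.1], out.2 ++ [inner.2]))
    ([], [])

-- ===== PRECONDITION & SPEC =====
-- Pre_ excludes only split_size = 0, on which A raises ZeroDivisionError.
def Pre_split_multi_batch_kv_idx_py (kv_nomask_idx_multi_batch : List (List Int)) (split_size : Int) : Prop :=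
  split_size ≠ 0
instance (kv_nomask_idx_multi_batch : List (List Int)) (split_size : Int) : Decidable (Pre_split_multi_batch_kv_idx_py kv_nomask_idx_multi_batch split_size) := by unfold Pre_split_multi_batch_kv_idx_py; infer_instance

def pvWitness_split_multi_batch_kv_idx_py : List (List Int) × Int := ([[1, 2, 3], [4]], 2)

-- On inputs with negative split_size where every batch has length ≤ 1 (including no batches),
-- A's formula (m+s-1)//s yields a positive `time` and A returns phantom all-empty segment rows,
-- while B's ceil division yields time 0 and B returns ([], []), the intended "no segments" result.
def D_split_multi_batch_kv_idx_py (kv_nomask_idx_multi_batch : List (List Int)) (split_size : Int) : Prop :=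
  split_size < 0 ∧ ∀ b ∈ kv_nomask_idx_multi_batch, b.length ≤ 1
instance (kv_nomask_idx_multi_batch : List (List Int)) (split_size : Int) : Decidable (D_split_multi_batch_kv_idx_py kv_nomask_idx_multi_batch split_size) := by unfold D_split_multi_batch_kv_idx_py; infer_instance

def Spec_split_multi_batch_kv_idx_py (kv_nomask_idx_multi_batch : List (List Int)) (split_size : Int) (out : List (List Int) × List (List Int)) : Prop := ¬ D_split_multi_batch_kv_idx_py kv_nomask_idx_multi_batch split_size → out = split_multi_batch_kv_idx_py_alt kv_nomask_idx_multi_batch split_size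
instance (kv_nomask_idx_multi_batch : List (List Int)) (split_size : Int) (out : List (List Int) × List (List Int)) : Decidable (Spec_split_multi_batch_kv_idx_py kv_nomask_idx_multi_batch split_size out) := by unfold Spec_split_multi_batch_kv_idx_py; infer_instance

def pvDiffWitness_split_multi_batch_kv_idx_py : List (List Int) × Int := ([[5]], -1)
def pvDiffWitnessOut_split_multi_batch_kv_idx_py : (List (List Int) × List (List Int)) × (List (List Int) × List (List Int)) := (([[]], [[0]]), ([], []))

-- ===== CLAIM (what is proved, stated in full; the proofs are below) =====
def Claim_unchanged_split_multi_batch_kv_idx_py : Prop := ∀ (kv_nomask_idx_multi_batch : List (List Int)) (split_size : Int), Dom_split_multi_batch_kv_idx_py kv_nomask_idx_multi_batch split_size → Pre_split_multi_batch_kv_idx_py kv_nomask_idx_multi_batch split_size → Spec_split_multi_batch_kv_idx_py kv_nomask_idx_multi_batch split_size (split_multi_batch_kv_idx_py kv_nomask_idx_multi_batch split_size)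
def Claim_changed_split_multi_batch_kv_idx_py : Prop := Dom_split_multi_batch_kv_idx_py (pvDiffWitness_split_multi_batch_kv_idx_py.1) (pvDiffWitness_split_multi_batch_kv_idx_py.2) ∧ Pre_split_multi_batch_kv_idx_py (pvDiffWitness_split_multi_batch_kv_idx_py.1) (pvDiffWitness_split_multi_batch_kv_idx_py.2) ∧ D_split_multi_batch_kv_idx_py (pvDiffWitness_split_multi_batch_kv_idx_py.1) (pvDiffWitness_split_multi_batch_kv_idx_py.2) ∧ split_multi_batch_kv_idx_py (pvDiffWitness_split_multi_batch_kv_idx_py.1) (pvDiffWitness_split_multi_batch_kv_idx_py.2) = pvDiffWitnessOut_split_multi_batch_kv_idx_py.1 ∧ split_multi_batch_kv_idx_py_alt (pvDiffWitness_split_multi_batch_kv_idx_py.1) (pvDiffWitness_split_multi_batch_kv_idx_py.2) = pvDiffWitnessOut_split_multi_batch_kv_idx_py.2 ∧ pvDiffWitnessOut_split_multi_batch_kv_idx_py.1 ≠ pvDiffWitnessOut_split_multi_batch_kv_idx_py.2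
def Claim_exact_split_multi_batch_kv_idx_py : Prop := ∀ (kv_nomask_idx_multi_batch : List (List Int)) (split_size : Int), Dom_split_multi_batch_kv_idx_py kv_nomask_idx_multi_batch split_size → Pre_split_multi_batch_kv_idx_py kv_nomask_idx_multi_batch split_size → D_split_multi_batch_kv_idx_py kv_nomask_idx_multi_batch split_size → split_multi_batch_kv_idx_py kv_nomask_idx_multi_batch split_size ≠ split_multi_batch_kv_idx_py_alt kv_nomask_idx_multi_batch split_size

-- ===== LEMMAS AND PROOFS =====

-- the shared maximum batch length
def pvMaxLen (kv : List (List Int)) : Int :=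
  (PySem.List.max? (kv.map (fun b => (b.length : Int))) (fun y => y)).getD 0
-- A's and B's time values
def pvTimeA (kv : List (List Int)) (ss : Int) : Int :=
  PySem.Int.floordiv (pvMaxLen kv + ss - 1) ss
def pvTimeB (kv : List (List Int)) (ss : Int) : Int :=
  -(PySem.Int.floordiv (-(pvMaxLen kv)) ss)
-- the merged index row and the length row at time t
def pvSegRow (kv : List (List Int)) (ss t : Int) : List Int :=
  kv.flatMap (fun b => PySem.List.slice b (some (t * ss)) (some (t * ss + ss)))
def pvLenRow (kv : List (List Int)) (ss t : Int) : List Int :=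
  kv.map (fun b => ((PySem.List.slice b (some (t * ss)) (some (t * ss + ss))).length : Int))

theorem pvFoldlPairSnoc {α β γ : Type} (f : α → β) (g : α → γ) (l : List α) (a : List β) (b : List γ) :
    l.foldl (fun st x => (st.1 ++ [f x], st.2 ++ [g x])) (a, b) = (a ++ l.map f, b ++ l.map g) := by
  induction l generalizing a b with
  | nil => simp
  | cons x xs ih => simp [ih]

theorem pvFoldlPairExtSnoc {α β γ : Type} (f : α → List β) (g : α → γ) (l : List α) (a : List β) (b : List γ) :
    l.foldl (fun st x => (st.1 ++ f x, st.2 ++ [g x])) (a, b) = (a ++ l.flatMap f, b ++ l.map g) := by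
  induction l generalizing a b with
  | nil => simp
  | cons x xs ih => simp [ih]

theorem pvGetMapRange {α : Type} (f : Int → α) (d : α) {T t : Int} (h0 : 0 ≤ t) (h1 : t < T) :
    (PySem.List.pyGet? ((PySem.List.pyRange 0 T).map f) t).getD d = f t := by
  rw [PySem.List.pyGet?_of_nonneg _ h0]
  have hlen : t.toNat < ((PySem.List.pyRange 0 T).map f).length := by
    rw [List.length_map, PySem.List.length_pyRange_one]; omega
  rw [List.getElem?_eq_getElem hlen]
  simp only [Option.getD_some, List.getElem_map, PySem.List.getElem_pyRange_one]
  congr 1; omega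

-- A's computed max equals pvMaxLen
theorem pvMaxA_eq (kv : List (List Int)) :
    (if (kv.map (fun batch => (batch.length : Int))) ≠ [] then
      (PySem.List.max? (kv.map (fun batch => (batch.length : Int))) (fun y => y)).getD 0 else 0)
    = pvMaxLen kv := by
  unfold pvMaxLen
  by_cases h : kv.map (fun batch => (batch.length : Int)) = []
  · simp [h, PySem.List.max?]
  · simp [h]

theorem pvMaxLen_nonneg (kv : List (List Int)) : 0 ≤ pvMaxLen kv := by
  unfold pvMaxLen
  cases hm : PySem.List.max? (kv.map (fun b => (b.length : Int))) (fun y => y) with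
  | none => simp
  | some m =>
    have := PySem.List.max?_mem hm
    simp only [List.mem_map] at this
    obtain ⟨b, _, hb⟩ := this
    simp [← hb]

theorem pvMaxLen_le_one {kv : List (List Int)} (h : ∀ b ∈ kv, b.length ≤ 1) : pvMaxLen kv ≤ 1 := by
  unfold pvMaxLen
  cases hm : PySem.List.max? (kv.map (fun b => (b.length : Int))) (fun y => y) with
  | none => simp
  | some m =>
    have := PySem.List.max?_mem hm
    simp only [List.mem_map] at this
    obtain ⟨b, hbmem, hb⟩ := this
    have := h b hbmem
    simp only [Option.getD_some, ← hb]
    exact_mod_cast this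

theorem pvMaxLen_ge {kv : List (List Int)} {b : List Int} (hb : b ∈ kv) :
    (b.length : Int) ≤ pvMaxLen kv := by
  unfold pvMaxLen
  cases hm : PySem.List.max? (kv.map (fun x => (x.length : Int))) (fun y => y) with
  | none =>
    rw [PySem.List.max?_eq_none_iff] at hm
    simp [List.map_eq_nil_iff] at hm
    simp [hm] at hb
  | some m =>
    have := PySem.List.max?_isMax hm (b.length : Int) (by exact List.mem_map_of_mem hb)
    simpa using this

-- characterization of port A
theorem pvA_char (kv : List (List Int)) (ss : Int) :
    split_multi_batch_kv_idx_py kv ss =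
      ((PySem.List.pyRange 0 (pvTimeA kv ss)).map (pvSegRow kv ss),
       if kv = [] then [] else (PySem.List.pyRange 0 (pvTimeA kv ss)).map (pvLenRow kv ss)) := by
  unfold split_multi_batch_kv_idx_py
  dsimp only
  rw [pvMaxA_eq kv]
  rw [show PySem.Int.floordiv (pvMaxLen kv + ss - 1) ss = pvTimeA kv ss from rfl]
  set T := pvTimeA kv ss with hT
  set R := PySem.List.pyRange 0 T with hR
  simp only [pvFoldlPairSnoc, List.nil_append,
    PySem.List.foldl_append_singleton_eq_map, PySem.List.foldl_append_eq_flatMap]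
  simp only [Prod.mk.injEq]
  constructor
  · -- merged component
    apply List.map_congr_left
    intro t ht
    rw [hR, PySem.List.mem_pyRange_one] at ht
    rw [List.flatMap_map]
    unfold pvSegRow
    apply List.flatMap_congr
    intro b _
    exact pvGetMapRange _ _ ht.1 ht.2
  · -- length component
    cases kv with
    | nil => simp [pvReshapeKvLenToTimeFirst]
    | cons b0 bs =>
      simp only [List.map_cons, pvReshapeKvLenToTimeFirst, reduceCtorEq]
      by_cases hRnil : R = []
      · simp [hRnil]
      · have hT0 : 0 < T := by
          by_contra h
          exact hRnil (by rw [hR]; exact PySem.List.pyRange_one_eq_nil (by omega))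
        have hr0 : (R.map (fun t => ((PySem.List.slice b0 (some (t * ss)) (some (t * ss + ss))).length : Int))) ≠ [] := by
          simpa using hRnil
        rw [if_neg hr0]
        have hlen : ((R.map (fun t => ((PySem.List.slice b0 (some (t * ss)) (some (t * ss + ss))).length : Int))).length : Int) = T := by
          rw [List.length_map, hR, PySem.List.length_pyRange_one]; omega
        rw [hlen, ← hR]
        apply List.map_congr_left
        intro t ht
        rw [hR, PySem.List.mem_pyRange_one] at ht
        unfold pvLenRow
        simp only [List.map_cons, List.map_map]
        congr 1
        · exact pvGetMapRange _ _ ht.1 ht.2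
        · apply List.map_congr_left
          intro b _
          exact pvGetMapRange _ _ ht.1 ht.2

-- characterization of port B
theorem pvB_char (kv : List (List Int)) (ss : Int) :
    split_multi_batch_kv_idx_py_alt kv ss =
      ((PySem.List.pyRange 0 (pvTimeB kv ss)).map (pvSegRow kv ss),
       (PySem.List.pyRange 0 (pvTimeB kv ss)).map (pvLenRow kv ss)) := by
  unfold split_multi_batch_kv_idx_py_alt
  dsimp only
  simp only [pvFoldlPairExtSnoc, List.nil_append, Prod.mk.injEq]
  constructor
  · exact (List.map_eq_flatMap).symm
  · rfl

-- ceiling identity for positive divisor: (m+s-1)//s = -((-m)//s)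
theorem pvCeil_eq {m ss : Int} (hss : 0 < ss) :
    PySem.Int.floordiv (m + ss - 1) ss = -(PySem.Int.floordiv (-m) ss) := by
  have h := (PySem.Int.floordiv_eq_iff_of_pos (a := m + ss - 1) (b := ss)
    (q := PySem.Int.floordiv (m + ss - 1) ss) hss).mp rfl
  symm
  rw [PySem.Int.neg_floordiv_neg_eq_iff_of_pos hss]
  constructor
  · nlinarith [h.1, h.2]
  · nlinarith [h.1, h.2]

theorem pvTimeAB_eq_of_pos (kv : List (List Int)) {ss : Int} (hss : 0 < ss) :
    pvTimeA kv ss = pvTimeB kv ss := pvCeil_eq hss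

theorem pvFloordiv_neg (a : Int) (ss : Int) :
    PySem.Int.floordiv a ss = PySem.Int.floordiv (-a) (-ss) := by
  rw [← PySem.Int.floordiv_neg_neg (-a) (-ss)]; simp

theorem pvTimeA_nonpos {kv : List (List Int)} {ss : Int} (hss : ss < 0) (hm : 2 ≤ pvMaxLen kv) :
    pvTimeA kv ss ≤ 0 := by
  unfold pvTimeA
  rw [pvFloordiv_neg]
  have h : PySem.Int.floordiv (-(pvMaxLen kv + ss - 1)) (-ss) < 1 := by
    rw [PySem.Int.floordiv_lt_iff_lt_mul (by omega)]
    omega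
  omega

theorem pvTimeB_nonpos {kv : List (List Int)} {ss : Int} (hss : ss < 0) :
    pvTimeB kv ss ≤ 0 := by
  unfold pvTimeB
  rw [pvFloordiv_neg]
  have h : 0 ≤ PySem.Int.floordiv (-(-(pvMaxLen kv))) (-ss) := by
    rw [PySem.Int.le_floordiv_iff_mul_le (by omega)]
    have := pvMaxLen_nonneg kv
    omega
  omega

theorem pvTimeA_pos {kv : List (List Int)} {ss : Int} (hss : ss < 0) (hm : pvMaxLen kv ≤ 1) :
    1 ≤ pvTimeA kv ss := by
  unfold pvTimeA
  rw [pvFloordiv_neg]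
  rw [PySem.Int.le_floordiv_iff_mul_le (by omega)]
  omega

-- ===== VERDICT (by name: the statement is the Claim_ definition above) =====
theorem split_multi_batch_kv_idx_py_spec : Claim_unchanged_split_multi_batch_kv_idx_py := by
  intro kv ss _ hpre
  unfold Spec_split_multi_batch_kv_idx_py
  intro hnd'
  rw [pvA_char, pvB_char]
  unfold Pre_split_multi_batch_kv_idx_py at hpre
  rcases lt_or_gt_of_ne hpre with hneg | hpos
  · -- negative split_size, outside D_: some batch has length ≥ 2, both sides are ([], [])
    unfold D_split_multi_batch_kv_idx_py at hnd'
    push Not at hnd'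
    obtain ⟨b, hbmem, hblen⟩ := hnd' hneg
    have hm : 2 ≤ pvMaxLen kv := le_trans (by exact_mod_cast hblen) (pvMaxLen_ge hbmem)
    rw [PySem.List.pyRange_one_eq_nil (pvTimeA_nonpos hneg hm),
        PySem.List.pyRange_one_eq_nil (pvTimeB_nonpos hneg)]
    simp
  · rw [pvTimeAB_eq_of_pos kv hpos]
    cases kv with
    | nil =>
      have : pvTimeB [] ss = 0 := by
        unfold pvTimeB pvMaxLen
        simp only [List.map_nil]
        have : PySem.List.max? ([] : List Int) (fun y => y) = none := by
          rw [PySem.List.max?_eq_none_iff]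
        rw [this]
        simp only [Option.getD_none, neg_zero]
        rw [PySem.Int.floordiv_eq_ediv_of_pos hpos]
        simp
      rw [this]
      simp [PySem.List.pyRange_one_eq_nil (le_refl 0)]
    | cons b0 bs => simp

theorem split_multi_batch_kv_idx_py_changed : Claim_changed_split_multi_batch_kv_idx_py := by
  unfold Claim_changed_split_multi_batch_kv_idx_py; decide

theorem split_multi_batch_kv_idx_py_tight : Claim_exact_split_multi_batch_kv_idx_py := by
  intro kv ss _ hpre hd heq
  unfold D_split_multi_batch_kv_idx_py at hd
  obtain ⟨hneg, hall⟩ := hd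
  have h1 := congrArg Prod.fst heq
  rw [pvA_char, pvB_char] at h1
  simp only [] at h1
  have hTA : 1 ≤ pvTimeA kv ss := pvTimeA_pos hneg (pvMaxLen_le_one hall)
  have hTB := pvTimeB_nonpos (kv := kv) hneg
  rw [PySem.List.pyRange_one_eq_nil hTB] at h1
  rw [PySem.List.pyRange_one_cons (show (0:Int) < pvTimeA kv ss by omega)] at h1
  simp at h1
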